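-- pv_equiv track=rewrite | github.com/tommycarstensen/tc9 | QC/QC_IBD_prune.py | count_relations
-- ===== SOURCE A (Python) =====
-- def count_relations(d_ID2IDs):
--
--     d_count2IDs = {}
--     for ID,l_IDs in d_ID2IDs.items():
--         count = len(l_IDs)
--         if not count in d_count2IDs.keys():
--             d_count2IDs[count] = []
--             pass
--         d_count2IDs[count] += [ID]
--
--     return d_count2IDs
-- ===== SOURCE B (Python) =====
-- def count_relations(d_ID2IDs):
--     # Two-phase grouping: distinct relation counts in first-seen order, then one
--     # selection scan per distinct count builds that bucket.
--     items = list(d_ID2IDs.items())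
--     return {c: [ID for ID, l_IDs in items if len(l_IDs) == c]
--             for c in dict.fromkeys(len(l_IDs) for _, l_IDs in items)}
-- ===== Notes on version B (the rewrite author's own statement) =====
-- stated objective: alternative
-- what changed: Replaces A's single pass that grows dict buckets entry by entry with a two-phase scheme: dedup the relation counts in first-seen order, then build each bucket by a comprehension-based selection scan over the items.
import Mathlib
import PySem

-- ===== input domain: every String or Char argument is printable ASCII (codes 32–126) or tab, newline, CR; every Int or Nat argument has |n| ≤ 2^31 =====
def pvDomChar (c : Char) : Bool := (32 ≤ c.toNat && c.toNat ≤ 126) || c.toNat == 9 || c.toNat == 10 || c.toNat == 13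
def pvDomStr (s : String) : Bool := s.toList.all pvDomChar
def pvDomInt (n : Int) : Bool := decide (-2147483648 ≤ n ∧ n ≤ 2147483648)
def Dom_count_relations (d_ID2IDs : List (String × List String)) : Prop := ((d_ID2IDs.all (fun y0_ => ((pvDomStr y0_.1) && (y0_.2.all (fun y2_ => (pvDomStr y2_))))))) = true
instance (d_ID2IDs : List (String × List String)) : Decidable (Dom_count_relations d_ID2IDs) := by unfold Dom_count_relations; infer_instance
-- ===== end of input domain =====

-- B replaces A's single bucket-growing dict pass by a two-phase grouping (dedup the
-- counts, then one selection scan per distinct count); alternative decomposition, not faster.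


-- ===== PORT A =====
def count_relations (d_ID2IDs : List (String × List String)) : List (Int × List String) :=
  (d_ID2IDs.foldl (fun d_count2IDs p =>
      let count : Int := p.2.length
      let d_count2IDs := if d_count2IDs.contains count then d_count2IDs
                         else d_count2IDs.insert count []
      d_count2IDs.insert count (d_count2IDs.getD count [] ++ [p.1]))
    (PySem.Dict.empty : PySem.Dict Int (List String))).items

-- ===== PORT B =====
def count_relations_alt (d_ID2IDs : List (String × List String)) : List (Int × List String) :=
  (PySem.List.dedup (d_ID2IDs.map (fun p => (p.2.length : Int)))).map (fun c =>
    (c, (d_ID2IDs.filter (fun p => (p.2.length : Int) == c)).map Prod.fst))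

-- ===== PRECONDITION & SPEC =====
def Spec_count_relations (d_ID2IDs : List (String × List String)) (out : List (Int × List String)) : Prop := out = count_relations_alt d_ID2IDs
instance (d_ID2IDs : List (String × List String)) (out : List (Int × List String)) : Decidable (Spec_count_relations d_ID2IDs out) := by unfold Spec_count_relations; infer_instance

-- ===== CLAIM (what is proved, stated in full; the proofs are below) =====
def Claim_equal_count_relations : Prop := ∀ (d_ID2IDs : List (String × List String)), Dom_count_relations d_ID2IDs → Spec_count_relations d_ID2IDs (count_relations d_ID2IDs)

-- ===== LEMMAS AND PROOFS =====

theorem dedup_append_singleton {α : Type} [BEq α] (m : List α) (c : α) :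
    PySem.List.dedup (m ++ [c]) =
      if (PySem.List.dedup m).contains c then PySem.List.dedup m
      else PySem.List.dedup m ++ [c] := by
  simp [PySem.List.dedup, PySem.Set.ofList, PySem.Set.add, List.foldl_append]

theorem stepA_contains (d : PySem.Dict Int (List String)) (x : String × List String)
    (h : d.contains ((x.2.length : Int)) = true) :
    (let count : Int := x.2.length
     let d2 := if d.contains count then d else d.insert count []
     d2.insert count (d2.getD count [] ++ [x.1]))
    = d.insert (x.2.length : Int) (d.getD (x.2.length : Int) [] ++ [x.1]) := by
  simp [h]

theorem stepA_not_contains (d : PySem.Dict Int (List String)) (x : String × List String)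
    (h : d.contains ((x.2.length : Int)) = false) :
    (let count : Int := x.2.length
     let d2 := if d.contains count then d else d.insert count []
     d2.insert count (d2.getD count [] ++ [x.1]))
    = d.insert (x.2.length : Int) [x.1] := by
  simp [h, PySem.Dict.getD_insert_self, PySem.Dict.insert_insert_self]

theorem alt_keys (l : List (String × List String)) :
    (count_relations_alt l).map Prod.fst = PySem.List.dedup (l.map (fun p => (p.2.length : Int))) := by
  simp [count_relations_alt, Function.comp_def]

theorem loop_items (l : List (String × List String)) :
    (l.foldl (fun d_count2IDs p =>
        let count : Int := p.2.length
        let d_count2IDs := if d_count2IDs.contains count then d_count2IDs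
                           else d_count2IDs.insert count []
        d_count2IDs.insert count (d_count2IDs.getD count [] ++ [p.1]))
      (PySem.Dict.empty : PySem.Dict Int (List String))).items
    = count_relations_alt l := by
  induction l using List.reverseRecOn with
  | nil => rfl
  | append_singleton l x ih =>
    simp only [List.foldl_append, List.foldl_cons, List.foldl_nil]
    set d := (l.foldl (fun d_count2IDs p =>
        let count : Int := p.2.length
        let d_count2IDs := if d_count2IDs.contains count then d_count2IDs
                           else d_count2IDs.insert count []
        d_count2IDs.insert count (d_count2IDs.getD count [] ++ [p.1]))
      (PySem.Dict.empty : PySem.Dict Int (List String))) with hdd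
    have hkeys : d.keys = PySem.List.dedup (l.map (fun p => (p.2.length : Int))) := by
      have := alt_keys l
      simpa [PySem.Dict.keys, ih] using this
    have hnd : d.keys.Nodup := by rw [hkeys]; exact PySem.List.nodup_dedup _
    by_cases hc : ((x.2.length : Int)) ∈ l.map (fun p => (p.2.length : Int))
    · have hcontains : d.contains ((x.2.length : Int)) = true := by
        rw [PySem.Dict.contains_iff_mem_keys, hkeys, PySem.List.mem_dedup]; exact hc
      have hcd : ((x.2.length : Int)) ∈ PySem.List.dedup (l.map (fun p => (p.2.length : Int))) :=
        (PySem.List.mem_dedup _ _).mpr hc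
      have hmem : (((x.2.length : Int)),
          (l.filter (fun p => ((p.2.length : Int)) == ((x.2.length : Int)))).map Prod.fst) ∈ d.items := by
        rw [ih]
        exact List.mem_map_of_mem hcd
      have hv : d.getD ((x.2.length : Int)) [] =
          (l.filter (fun p => ((p.2.length : Int)) == ((x.2.length : Int)))).map Prod.fst :=
        PySem.Dict.getD_of_mem_items d hmem hnd []
      have hcont' : (PySem.List.dedup (l.map (fun p => (p.2.length : Int)))).contains ((x.2.length : Int)) = true := by
        simpa using hcd
      rw [stepA_contains d x hcontains,
          PySem.Dict.items_insert_of_contains _ _ hcontains, ih, hv]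
      show _ = count_relations_alt (l ++ [x])
      unfold count_relations_alt
      simp only [List.map_append, List.map_cons, List.map_nil]
      rw [dedup_append_singleton, hcont', if_pos rfl, List.map_map]
      apply List.map_congr_left
      intro a ha
      by_cases hac : a = ((x.2.length : Int))
      · subst hac
        simp [List.filter_append]
      · have : ¬ (((x.2.length : Int)) == a) = true := by simpa using fun h => hac h.symm
        simp [List.filter_append, hac, this]
    · have hcontains : d.contains ((x.2.length : Int)) = false := by
        rw [Bool.eq_false_iff]
        intro h
        have hk := (PySem.Dict.contains_iff_mem_keys d _).mp h
        rw [hkeys, PySem.List.mem_dedup] at hk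
        exact hc hk
      have hcont' : (PySem.List.dedup (l.map (fun p => (p.2.length : Int)))).contains ((x.2.length : Int)) = false := by
        rw [Bool.eq_false_iff]
        intro h
        exact hc ((PySem.List.mem_dedup _ _).mp (by simpa using h))
      have hfilnil : l.filter (fun p => ((p.2.length : Int)) == ((x.2.length : Int))) = [] := by
        rw [List.filter_eq_nil_iff]
        intro p hp hbe
        exact hc (List.mem_map.mpr ⟨p, hp, by simpa using hbe⟩)
      rw [stepA_not_contains d x hcontains,
          PySem.Dict.items_insert_of_not_contains _ _ hcontains, ih]
      show _ = count_relations_alt (l ++ [x])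
      unfold count_relations_alt
      simp only [List.map_append, List.map_cons, List.map_nil]
      rw [dedup_append_singleton, hcont', if_neg (by simp), List.map_append]
      congr 1
      · apply List.map_congr_left
        intro a ha
        have hamem : a ∈ l.map (fun p => (p.2.length : Int)) := (PySem.List.mem_dedup _ _).mp ha
        have hac : ¬ (((x.2.length : Int)) == a) = true := by
          simp only [beq_iff_eq]
          intro h; exact hc (h ▸ hamem)
        simp [List.filter_append, hac]
      · simp [List.filter_append, hfilnil]

-- ===== VERDICT (by name: the statement is the Claim_ definition above) =====
theorem count_relations_spec : Claim_equal_count_relations := by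
  intro d _
  unfold Spec_count_relations count_relations
  exact loop_items d
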